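-- pv_equiv track=rewrite | github.com/kdExile/learningPy | emirp in a list.py | check
-- ===== SOURCE A (Python) =====
-- def prime(n):
--     c=0
--     for i in range(1,n//2+1):
--         if n%i==0:
--             c=c+1
--     return c==1
--
-- def reverse(n):
--     r=0
--     while n>0:
--         r=r*10+n%10
--         n//=10
--     return r
--
-- def check(l):
--     x=[]
--     for i in range(len(l)):
--         for j in range(i+1,len(l)):
--             if prime(l[i]) and prime(reverse(l[i])) and l[i]==reverse(l[j]) and x.count(l[i])==0 and x.count(l[j])==0:
--                 x.append(l[i])
--                 x.append(l[j])
--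
--     return x
-- ===== SOURCE B (Python) =====
-- def check(l):
--     # Faster re-implementation: reverses computed once, sqrt trial-division primality
--     # computed once per element, a 'seen' set instead of x.count, break on first mate.
--     def rev(n):
--         r = 0
--         while n > 0:
--             r = r * 10 + n % 10
--             n //= 10
--         return r
--
--     def is_prime(n):
--         if n < 2:
--             return False
--         i = 2
--         while i * i <= n:
--             if n % i == 0:
--                 return False
--             i += 1
--         return True
--
--     pairs = [(v, rev(v)) for v in l]
--     out = []
--     seen = set()
--     for i, (v, r) in enumerate(pairs):
--         if v not in seen and is_prime(v) and is_prime(r):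
--             for w, s in pairs[i + 1:]:
--                 if s == v and w not in seen:
--                     out.append(v)
--                     out.append(w)
--                     seen.add(v)
--                     seen.add(w)
--                     break
--     return out
-- ===== Notes on version B (the rewrite author's own statement) =====
-- stated objective: faster
-- what changed: Reverses are computed once and paired with the elements, primality is tested once per element by trial division up to sqrt(n) instead of counting all divisors up to n/2 for every pair, duplicate suppression uses a growing 'seen' set instead of rescanning the output with list.count, and the inner scan breaks at the first mate.
import Mathlib
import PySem

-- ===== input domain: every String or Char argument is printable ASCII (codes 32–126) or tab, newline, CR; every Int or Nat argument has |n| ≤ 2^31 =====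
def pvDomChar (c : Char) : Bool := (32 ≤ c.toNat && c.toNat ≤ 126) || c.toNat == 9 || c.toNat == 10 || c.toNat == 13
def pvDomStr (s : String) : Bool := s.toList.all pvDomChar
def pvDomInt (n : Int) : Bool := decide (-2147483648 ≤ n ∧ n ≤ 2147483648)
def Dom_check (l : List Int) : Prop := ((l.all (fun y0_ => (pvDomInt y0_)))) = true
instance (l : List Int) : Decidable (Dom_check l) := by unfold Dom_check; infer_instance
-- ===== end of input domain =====

-- B is a faster exact re-implementation: reverses paired up once, sqrt-bounded trial
-- division once per element, a 'seen' set instead of x.count, break on first mate.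

-- ===== PORT A =====
-- A's prime(n): counts divisors in 1..n//2 and tests count == 1
def primeA (n : Int) : Bool :=
  ((PySem.List.pyRange 1 (PySem.Int.floordiv n 2 + 1) 1).foldl
    (fun c i => if PySem.Int.mod n i == 0 then c + 1 else c) (0 : Int)) == 1

-- A's reverse(n): while n>0 digit loop
def reverseALoop (r n : Int) : Int :=
  if 0 < n then
    reverseALoop (r * 10 + PySem.Int.mod n 10) (PySem.Int.floordiv n 10)
  else r
termination_by n.toNat
decreasing_by
  have h10 : PySem.Int.floordiv n 10 = n / 10 := PySem.Int.floordiv_eq_ediv_of_pos (by omega)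
  simp only [h10]; omega

def reverseA (n : Int) : Int := reverseALoop 0 n

def check (l : List Int) : List Int :=
  (PySem.List.pyRange 0 (PySem.List.len l) 1).foldl
    (fun x i =>
      (PySem.List.pyRange (i + 1) (PySem.List.len l) 1).foldl
        (fun x j =>
          if primeA (PySem.List.pyGetD l i 0) && primeA (reverseA (PySem.List.pyGetD l i 0)) &&
              (PySem.List.pyGetD l i 0 == reverseA (PySem.List.pyGetD l j 0)) &&
              (PySem.List.count x (PySem.List.pyGetD l i 0) == 0) &&
              (PySem.List.count x (PySem.List.pyGetD l j 0) == 0)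
          then x ++ [PySem.List.pyGetD l i 0, PySem.List.pyGetD l j 0]
          else x)
        x)
    []

-- ===== PORT B =====
-- B's rev(n): same digit loop as A's reverse
def revBLoop (r n : Int) : Int :=
  if 0 < n then
    revBLoop (r * 10 + PySem.Int.mod n 10) (PySem.Int.floordiv n 10)
  else r
termination_by n.toNat
decreasing_by
  have h10 : PySem.Int.floordiv n 10 = n / 10 := PySem.Int.floordiv_eq_ediv_of_pos (by omega)
  simp only [h10]; omega

def revB (n : Int) : Int := revBLoop 0 n

-- B's is_prime: trial division while i*i <= n
def isPrimeLoop (n i : Int) : Bool :=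
  if i * i ≤ n then
    (if PySem.Int.mod n i == 0 then false else isPrimeLoop n (i + 1))
  else true
termination_by (n + 1 - i).toNat
decreasing_by
  have h1 : 0 ≤ n - i := by rcases le_or_gt i 1 with h2 | h2 <;> nlinarith
  omega

def isPrimeB (n : Int) : Bool := if n < 2 then false else isPrimeLoop n 2

-- the break-ing inner scan: first later element whose reverse is v and not yet seen
def bInner (v : Int) (seen : PySem.Set Int) : List (Int × Int) → Option Int
  | [] => none
  | (w, s) :: rest =>
      if s == v && !(PySem.Set.contains seen w) then some w else bInner v seen rest

def bOuter (out : List Int) (seen : PySem.Set Int) : List (Int × Int) → List Int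
  | [] => out
  | (v, r) :: rest =>
      if !(PySem.Set.contains seen v) && isPrimeB v && isPrimeB r then
        match bInner v seen rest with
        | some w => bOuter (out ++ [v, w]) (PySem.Set.add (PySem.Set.add seen v) w) rest
        | none => bOuter out seen rest
      else bOuter out seen rest

def check_alt (l : List Int) : List Int :=
  bOuter [] PySem.Set.empty (l.map (fun v => (v, revB v)))

-- ===== PRECONDITION & SPEC =====
def Spec_check (l : List Int) (out : List Int) : Prop := out = check_alt l
instance (l : List Int) (out : List Int) : Decidable (Spec_check l out) := by unfold Spec_check; infer_instance

-- ===== CLAIM (what is proved, stated in full; the proofs are below) =====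
def Claim_equal_check : Prop := ∀ (l : List Int), Dom_check l → Spec_check l (check l)

-- ===== LEMMAS AND PROOFS =====

-- A's inner-loop body, as a function of the current list x and the later element w
def innerF (v : Int) (x : List Int) (w : Int) : List Int :=
  if primeA v && primeA (reverseA v) && (v == reverseA w) &&
      (PySem.List.count x v == 0) && (PySem.List.count x w == 0)
  then x ++ [v, w] else x

lemma revBLoop_eq (r n : Int) : revBLoop r n = reverseALoop r n := by
  fun_induction revBLoop r n with
  | case1 r n h ih => rw [reverseALoop, if_pos h]; exact ih
  | case2 r n h => rw [reverseALoop, if_neg h]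

lemma revB_eq (n : Int) : revB n = reverseA n := revBLoop_eq 0 n

lemma isPrimeLoop_iff (n : Int) :
    ∀ (k : Nat) (i : Int), (n + 1 - i).toNat ≤ k → 2 ≤ i →
      (isPrimeLoop n i = true ↔ ∀ m : Int, i ≤ m → m * m ≤ n → ¬ m ∣ n) := by
  intro k
  induction k with
  | zero =>
    intro i hk hi
    have hni : n < i := by omega
    have hii : ¬ (i * i ≤ n) := by nlinarith
    rw [isPrimeLoop, if_neg hii]
    exact iff_of_true rfl (fun m hm hmm hd => absurd hmm (by nlinarith))
  | succ k ih =>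
    intro i hk hi
    rw [isPrimeLoop]
    by_cases hii : i * i ≤ n
    · rw [if_pos hii]
      by_cases hmod : (PySem.Int.mod n i == 0) = true
      · rw [if_pos hmod]
        have hdvd : i ∣ n := (PySem.Int.mod_eq_zero_iff_dvd n i).mp (by simpa using hmod)
        exact iff_of_false (by simp) (fun hall => hall i le_rfl hii hdvd)
      · rw [if_neg hmod]
        have hmod' : ¬ (i ∣ n) := fun hd =>
          hmod (by simp [(PySem.Int.mod_eq_zero_iff_dvd n i).mpr hd])
        rw [ih (i + 1) (by omega) (by omega)]
        constructor
        · intro h m hm hmm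
          rcases eq_or_lt_of_le hm with rfl | hlt
          · exact hmod'
          · exact h m (by omega) hmm
        · intro h m hm hmm
          exact h m (by omega) hmm
    · rw [if_neg hii]
      rw [not_le] at hii
      exact iff_of_true rfl (fun m hm hmm hd => absurd hmm (by nlinarith))

lemma isPrimeB_iff (n : Int) :
    isPrimeB n = true ↔ (2 ≤ n ∧ ∀ m : Int, 2 ≤ m → m * m ≤ n → ¬ m ∣ n) := by
  unfold isPrimeB
  by_cases h : n < 2
  · rw [if_pos h]
    exact iff_of_false (by simp) (fun ⟨h2, _⟩ => by omega)
  · rw [if_neg h, isPrimeLoop_iff n (n + 1 - 2).toNat 2 le_rfl (by omega)]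
    constructor
    · intro hall; exact ⟨by omega, hall⟩
    · intro ⟨_, hall⟩; exact hall

lemma primeA_iff (n : Int) :
    primeA n = true ↔ (2 ≤ n ∧ ∀ m : Int, 2 ≤ m → m * m ≤ n → ¬ m ∣ n) := by
  unfold primeA
  rw [PySem.List.foldl_if_add_one]
  by_cases hn : n < 2
  · have hfd : PySem.Int.floordiv n 2 < 1 := by
      rw [PySem.Int.floordiv_lt_iff_lt_mul (by omega)]; omega
    rw [PySem.List.pyRange_one_eq_nil (by omega)]
    exact iff_of_false (by simp) (fun ⟨h2, _⟩ => by omega)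
  · have hfd : 1 ≤ PySem.Int.floordiv n 2 := by
      rw [PySem.Int.le_floordiv_iff_mul_le (by omega)]; omega
    rw [PySem.List.pyRange_one_cons (by omega), List.countP_cons]
    have h1d : (PySem.Int.mod n 1 == 0) = true := by
      simp
    simp only [h1d, if_pos]
    have key : ∀ c : Nat, ((0 + ((c + 1 : Nat) : Int) == 1) = true) ↔ c = 0 := by
      intro c; rw [beq_iff_eq]; push_cast; omega
    rw [key, List.countP_eq_zero]
    constructor
    · intro h
      refine ⟨by omega, ?_⟩
      intro m h2 hmm hd
      have hm2 : m * 2 ≤ n := by nlinarith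
      have hmem : m ∈ PySem.List.pyRange 2 (PySem.Int.floordiv n 2 + 1) 1 := by
        rw [PySem.List.mem_pyRange_one]
        refine ⟨h2, ?_⟩
        rw [Int.lt_add_one_iff, PySem.Int.le_floordiv_iff_mul_le (by omega)]
        exact hm2
      exact (h m hmem) (by simpa using (PySem.Int.mod_eq_zero_iff_dvd n m).mpr hd)
    · rintro ⟨h2, hall⟩ x hmem
      rw [PySem.List.mem_pyRange_one] at hmem
      obtain ⟨hx2, hxlt⟩ := hmem
      have hx2n : x * 2 ≤ n := by
        rw [← PySem.Int.le_floordiv_iff_mul_le (by omega)]; omega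
      intro hp
      have hdvd : x ∣ n := (PySem.Int.mod_eq_zero_iff_dvd n x).mp (by simpa using hp)
      obtain ⟨kq, hkq⟩ := hdvd
      have hx0 : (0 : Int) < x := by omega
      have hk2 : 2 ≤ kq := by nlinarith
      rcases le_or_gt (x * x) n with hxx | hxx
      · exact hall x hx2 hxx ⟨kq, hkq⟩
      · exact hall kq hk2 (by nlinarith) ⟨x, by rw [hkq]; ring⟩

lemma prime_eq (n : Int) : isPrimeB n = primeA n := by
  rw [Bool.eq_iff_iff, isPrimeB_iff, primeA_iff]

lemma count_beq_zero (x : List Int) (v : Int) :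
    (PySem.List.count x v == 0) = true ↔ v ∉ x := by
  rw [PySem.List.count_eq, beq_iff_eq, List.count_eq_zero]

-- A's inner loop never fires once the head tests fail or v is already collected
lemma innerF_stuck (v : Int) (x : List Int) (ws : List Int)
    (h : (primeA v && primeA (reverseA v)) = false ∨ v ∈ x) :
    ws.foldl (innerF v) x = x := by
  induction ws with
  | nil => rfl
  | cons w ws ih =>
    have hF : innerF v x w = x := by
      unfold innerF
      rcases h with h | h
      · rw [h]; simp
      · have hc : (PySem.List.count x v == 0) = false := by
          rw [Bool.eq_false_iff]
          intro hc; exact ((count_beq_zero x v).mp hc) h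
        rw [hc]; simp
    rw [List.foldl_cons, hF, ih]

-- one pass of A's inner loop against B's break-ing scan, from the same state
lemma inner_cases (v : Int) (seen : PySem.Set Int) (x : List Int) (ws : List Int)
    (hInv : ∀ w, w ∈ seen ↔ w ∈ x)
    (hg : (primeA v && primeA (reverseA v)) = true) (hv : v ∉ x) :
    (bInner v seen (ws.map (fun w => (w, revB w))) = none ∧ ws.foldl (innerF v) x = x) ∨
    (∃ w, bInner v seen (ws.map (fun w => (w, revB w))) = some w ∧
      ws.foldl (innerF v) x = x ++ [v, w]) := by
  induction ws with
  | nil => exact Or.inl ⟨rfl, rfl⟩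
  | cons w ws ih =>
    simp only [List.map_cons, List.foldl_cons, bInner]
    by_cases hcond : (revB w == v && !(PySem.Set.contains seen w)) = true
    · rw [if_pos hcond]
      rw [Bool.and_eq_true, beq_iff_eq, Bool.not_eq_true'] at hcond
      obtain ⟨h1, h2⟩ := hcond
      have hwx : w ∉ x := by
        intro hw
        rw [Bool.eq_false_iff] at h2
        exact h2 ((PySem.Set.contains_iff seen w).mpr ((hInv w).mpr hw))
      have hF : innerF v x w = x ++ [v, w] := by
        unfold innerF
        have hveq : (v == reverseA w) = true := by
          rw [beq_iff_eq, ← revB_eq, h1]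
        rw [hg, hveq, (count_beq_zero x v).mpr hv, (count_beq_zero x w).mpr hwx]
        simp
      rw [hF, innerF_stuck v _ ws (Or.inr (by simp))]
      exact Or.inr ⟨w, rfl, rfl⟩
    · rw [if_neg hcond]
      have hF : innerF v x w = x := by
        unfold innerF
        by_cases h1 : revB w = v
        · have h2 : w ∈ seen := by
            rw [Bool.and_eq_true, beq_iff_eq, Bool.not_eq_true'] at hcond
            push Not at hcond
            have h3 := hcond h1
            rw [ne_eq, Bool.not_eq_false] at h3
            exact (PySem.Set.contains_iff seen w).mp h3
          have hwx : w ∈ x := (hInv w).mp h2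
          have hc : (PySem.List.count x w == 0) = false := by
            rw [Bool.eq_false_iff]
            intro hc; exact ((count_beq_zero x w).mp hc) hwx
          rw [hc]; simp
        · have hveq : (v == reverseA w) = false := by
            rw [← revB_eq, Bool.eq_false_iff, ne_eq, beq_iff_eq]
            exact fun e => h1 e.symm
          rw [hveq]; simp
      rw [hF]
      exact ih

-- the outer loops, run from any common state tied by the seen/x invariant
lemma outer_eq (l : List Int) : ∀ (k i : Nat), l.length ≤ i + k →
    ∀ (x : List Int) (seen : PySem.Set Int), (∀ w, w ∈ seen ↔ w ∈ x) →
    (PySem.List.pyRange (i : Int) (PySem.List.len l) 1).foldl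
      (fun x ii =>
        (PySem.List.pyRange (ii + 1) (PySem.List.len l) 1).foldl
          (fun x j => innerF (PySem.List.pyGetD l ii 0) x (PySem.List.pyGetD l j 0)) x) x
      = bOuter x seen ((l.drop i).map (fun v => (v, revB v))) := by
  intro k
  induction k with
  | zero =>
    intro i hk x seen hInv
    rw [PySem.List.pyRange_one_eq_nil (by simp; omega),
      List.drop_eq_nil_of_le (by omega)]
    rfl
  | succ k ih =>
    intro i hk x seen hInv
    by_cases hi : i < l.length
    · rw [PySem.List.pyRange_one_cons (by simp; omega), List.foldl_cons]
      have hv : PySem.List.pyGetD l (i : Int) 0 = l[i] := by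
        rw [PySem.List.pyGetD_natCast, List.getD_eq_getElem l 0 hi]
      have hcast : ((i : Int) + 1) = ((i + 1 : Nat) : Int) := by push_cast; ring
      have hinner : ∀ y : List Int,
          (PySem.List.pyRange ((i : Int) + 1) (PySem.List.len l) 1).foldl
            (fun x j => innerF (PySem.List.pyGetD l (i : Int) 0) x (PySem.List.pyGetD l j 0)) y
          = (l.drop (i + 1)).foldl (innerF l[i]) y := by
        intro y
        rw [hv]
        have := PySem.List.foldl_pyRange_pyGetD (xs := l) (a := (i : Int) + 1) (d := 0)
          (f := innerF l[i]) (init := y) (by omega)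
        rw [show (((i : Int) + 1)).toNat = i + 1 by omega] at this
        exact this
      rw [hinner, List.drop_eq_getElem_cons hi, List.map_cons]
      by_cases hg : (primeA l[i] && primeA (reverseA l[i])) = true
      · by_cases hvx : l[i] ∈ x
        · rw [innerF_stuck l[i] x _ (Or.inr hvx)]
          have hc : PySem.Set.contains seen l[i] = true :=
            (PySem.Set.contains_iff seen l[i]).mpr ((hInv l[i]).mpr hvx)
          have hB : bOuter x seen ((l[i], revB l[i]) :: (l.drop (i + 1)).map (fun v => (v, revB v)))
              = bOuter x seen ((l.drop (i + 1)).map (fun v => (v, revB v))) := by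
            rw [bOuter, if_neg (by rw [hc]; simp)]
          rw [hB, hcast]
          exact ih (i + 1) (by omega) x seen hInv
        · have hc : PySem.Set.contains seen l[i] = false := by
            rw [Bool.eq_false_iff]
            intro hc
            exact hvx ((hInv l[i]).mp ((PySem.Set.contains_iff seen l[i]).mp hc))
          have hgB : (!(PySem.Set.contains seen l[i]) && isPrimeB l[i] && isPrimeB (revB l[i])) = true := by
            rw [revB_eq, prime_eq, prime_eq, hc]
            simp only [Bool.and_eq_true] at hg ⊢
            exact ⟨⟨rfl, hg.1⟩, hg.2⟩
          rcases inner_cases l[i] seen x (l.drop (i + 1)) hInv hg hvx with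
            ⟨hnone, hfold⟩ | ⟨w, hsome, hfold⟩
          · rw [hfold]
            have hB : bOuter x seen ((l[i], revB l[i]) :: (l.drop (i + 1)).map (fun v => (v, revB v)))
                = bOuter x seen ((l.drop (i + 1)).map (fun v => (v, revB v))) := by
              rw [bOuter, if_pos hgB, hnone]
            rw [hB, hcast]
            exact ih (i + 1) (by omega) x seen hInv
          · rw [hfold]
            have hB : bOuter x seen ((l[i], revB l[i]) :: (l.drop (i + 1)).map (fun v => (v, revB v)))
                = bOuter (x ++ [l[i], w]) (PySem.Set.add (PySem.Set.add seen l[i]) w)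
                    ((l.drop (i + 1)).map (fun v => (v, revB v))) := by
              rw [bOuter, if_pos hgB, hsome]
            rw [hB, hcast]
            refine ih (i + 1) (by omega) (x ++ [l[i], w]) _ ?_
            intro u
            rw [PySem.Set.mem_add, PySem.Set.mem_add]
            simp only [List.mem_append, List.mem_cons, List.not_mem_nil, or_false]
            rw [hInv u]
            tauto
      · rw [Bool.not_eq_true] at hg
        rw [innerF_stuck l[i] x _ (Or.inl hg)]
        have hgB : (!(PySem.Set.contains seen l[i]) && isPrimeB l[i] && isPrimeB (revB l[i])) = false := by
          rw [revB_eq, prime_eq, prime_eq]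
          cases h1 : primeA l[i] <;> cases h2 : primeA (reverseA l[i]) <;>
            cases PySem.Set.contains seen l[i] <;> simp_all
        have hB : bOuter x seen ((l[i], revB l[i]) :: (l.drop (i + 1)).map (fun v => (v, revB v)))
            = bOuter x seen ((l.drop (i + 1)).map (fun v => (v, revB v))) := by
          rw [bOuter, if_neg (by rw [hgB]; exact Bool.false_ne_true)]
        rw [hB, hcast]
        exact ih (i + 1) (by omega) x seen hInv
    · rw [PySem.List.pyRange_one_eq_nil (by simp; omega),
        List.drop_eq_nil_of_le (by omega)]
      rfl

lemma check_eq_alt (l : List Int) : check l = check_alt l := by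
  have hA : check l =
      (PySem.List.pyRange ((0 : Nat) : Int) (PySem.List.len l) 1).foldl
        (fun x ii =>
          (PySem.List.pyRange (ii + 1) (PySem.List.len l) 1).foldl
            (fun x j => innerF (PySem.List.pyGetD l ii 0) x (PySem.List.pyGetD l j 0)) x) [] := rfl
  rw [hA, outer_eq l l.length 0 (by omega) [] PySem.Set.empty (by simp [PySem.Set.empty])]
  rfl

-- ===== VERDICT (by name: the statement is the Claim_ definition above) =====
theorem check_spec : Claim_equal_check := by
  intro l _
  unfold Spec_check
  exact check_eq_alt l
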